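-- pv_equiv track=rewrite | github.com/annyoon/ps | Python3/프로그래머스/1/138477. 명예의 전당 （1）/명예의 전당 （1）.py | solution
-- ===== SOURCE A (Python) =====
-- def solution(k, score):
--     answer = []
--     rank = []
--     for s in score:
--         if len(rank) < k:
--             rank.append(s)
--         else:
--             m = min(rank)
--             if s > m:
--                 rank.remove(m)
--                 rank.append(s)
--         answer.append(min(rank))
--     return answer
-- ===== SOURCE B (Python) =====
-- import bisect
--
-- def solution(k, score):
--     answer = []
--     rank = []
--     for s in score:
--         bisect.insort(rank, s)
--         if len(rank) > k:
--             del rank[0]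
--         answer.append(rank[0])
--     return answer
-- ===== Notes on version B (the rewrite author's own statement) =====
-- stated objective: faster
-- what changed: B keeps one list in ascending sorted order via bisect.insort and pops the smallest when it exceeds k, so the answer is always rank[0]; A's size branch, interpreted min() scan and remove() scan per element disappear.
import Mathlib
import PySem

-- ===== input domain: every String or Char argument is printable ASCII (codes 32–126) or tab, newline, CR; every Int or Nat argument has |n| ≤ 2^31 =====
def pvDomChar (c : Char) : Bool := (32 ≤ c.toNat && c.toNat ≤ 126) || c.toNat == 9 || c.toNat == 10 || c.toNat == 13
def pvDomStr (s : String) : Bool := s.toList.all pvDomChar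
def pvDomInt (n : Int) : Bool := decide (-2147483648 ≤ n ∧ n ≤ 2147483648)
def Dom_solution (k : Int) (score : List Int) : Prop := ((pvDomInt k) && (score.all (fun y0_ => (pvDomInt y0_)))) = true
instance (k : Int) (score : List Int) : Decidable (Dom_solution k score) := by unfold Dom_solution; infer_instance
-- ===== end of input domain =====

-- B replaces A's size-check branch, min() scan and conditional remove/append by one sorted
-- list maintained with bisect.insort, popping the smallest when its length exceeds k (simpler).

-- ===== PORT A =====
-- one loop iteration of A over the state (answer, rank)
def pvStepA (k : Int) (st : List Int × List Int) (s : Int) : List Int × List Int :=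
  let rank :=
    if (st.2.length : Int) < k then st.2 ++ [s]
    else
      match PySem.List.min? st.2 (fun x => x) with
      | some m => if s > m then ((PySem.List.remove? st.2 m).getD st.2) ++ [s] else st.2
      | none => st.2            -- min([]) raises ValueError: excluded by Pre_solution
  match PySem.List.min? rank (fun x => x) with
  | some m => (st.1 ++ [m], rank)
  | none => (st.1, rank)        -- min([]) raises ValueError: excluded by Pre_solution

def solution (k : Int) (score : List Int) : List Int :=
  (score.foldl (pvStepA k) ([], [])).1

-- ===== PORT B =====
-- one loop iteration of B; bisect.insort on a sorted Int list is List.orderedInsert (· ≤ ·)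
def pvStepB (k : Int) (st : List Int × List Int) (s : Int) : List Int × List Int :=
  let inserted := List.orderedInsert (· ≤ ·) s st.2
  let rank := if (inserted.length : Int) > k then inserted.tail else inserted  -- del rank[0]
  match PySem.List.pyGet? rank 0 with
  | some v => (st.1 ++ [v], rank)
  | none => (st.1, rank)        -- rank[0] raises IndexError: excluded by Pre_solution

def solution_alt (k : Int) (score : List Int) : List Int :=
  (score.foldl (pvStepB k) ([], [])).1

-- ===== PRECONDITION & SPEC =====
-- A raises ValueError (min of an empty rank) whenever k ≤ 0 and score is nonempty;
-- B raises IndexError there too. Those inputs are excluded; everything else is admitted.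
def Pre_solution (k : Int) (score : List Int) : Prop := 1 ≤ k ∨ score = []
instance (k : Int) (score : List Int) : Decidable (Pre_solution k score) := by
  unfold Pre_solution; infer_instance

def pvWitness_solution : Int × List Int := (3, [10, 100, 20, 150, 1, 100, 200])

def Spec_solution (k : Int) (score : List Int) (out : List Int) : Prop := out = solution_alt k score
instance (k : Int) (score : List Int) (out : List Int) : Decidable (Spec_solution k score out) := by
  unfold Spec_solution; infer_instance

-- ===== CLAIM (what is proved, stated in full; the proofs are below) =====
def Claim_equal_solution : Prop := ∀ (k : Int) (score : List Int), Dom_solution k score → Pre_solution k score → Spec_solution k score (solution k score)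

-- ===== LEMMAS AND PROOFS =====

-- folding min over elements all ≥ the seed returns the seed
lemma foldl_min_of_le (t : List Int) (x : Int) (h : ∀ y ∈ t, x ≤ y) :
    t.foldl min x = x := by
  induction t with
  | nil => rfl
  | cons a t ih =>
      simp only [List.foldl_cons]
      rw [min_eq_left (h a (by simp))]
      exact ih (fun y hy => h y (by simp [hy]))

-- Python min() of any permutation of a sorted nonempty list is its head
lemma min?_eq_head (l : List Int) (h : Int) (t : List Int)
    (hp : l.Perm (h :: t)) (hs : (h :: t).Pairwise (· ≤ ·)) :
    PySem.List.min? l (fun y => y) = some h := by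
  match l, hp with
  | [], hp => exact absurd hp.length_eq (by simp)
  | a :: t', hp =>
    rw [PySem.List.min?_id_cons]
    have h1 : (a :: t').foldl min a = t'.foldl min a := by simp
    have h2 : (a :: t').foldl min a = (h :: t).foldl min a := hp.foldl_eq a
    have ha : a ∈ h :: t := hp.mem_iff.mp (by simp)
    have hha : h ≤ a := by
      rcases List.mem_cons.mp ha with rfl | ha'
      · exact le_refl a
      · exact List.rel_of_pairwise_cons hs ha'
    have h3 : (h :: t).foldl min a = t.foldl min h := by
      simp [min_eq_right hha]
    have h4 : t.foldl min h = h :=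
      foldl_min_of_le t h (fun y hy => List.rel_of_pairwise_cons hs hy)
    rw [← h1, h2, h3, h4]

-- one loop step preserves the simulation invariant and produces the same answer entry
lemma step_sim (k : Int) (hk : 1 ≤ k) (ans rA rB : List Int) (s : Int)
    (hperm : rB.Perm rA) (hsort : rB.Pairwise (· ≤ ·)) (hlen : (rA.length : Int) ≤ k) :
    ∃ ans' rA' rB', pvStepA k (ans, rA) s = (ans', rA') ∧ pvStepB k (ans, rB) s = (ans', rB') ∧
      rB'.Perm rA' ∧ rB'.Pairwise (· ≤ ·) ∧ ((rA'.length : Int) ≤ k) := by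
  have hlenBA : rB.length = rA.length := hperm.length_eq
  have hsortins : (List.orderedInsert (· ≤ ·) s rB).Pairwise (· ≤ ·) :=
    List.Pairwise.orderedInsert s rB hsort
  by_cases hlt : (rA.length : Int) < k
  · -- rank short: A appends, B inserts without popping
    have hnotpop : ¬ (((List.orderedInsert (· ≤ ·) s rB).length : Int) > k) := by
      rw [List.orderedInsert_length]; push_cast; omega
    have hperm' : (List.orderedInsert (· ≤ ·) s rB).Perm (rA ++ [s]) :=
      (List.perm_orderedInsert _ s rB).trans
        ((hperm.cons s).trans (List.perm_append_singleton s rA).symm)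
    obtain ⟨h0, t0, hins⟩ : ∃ h0 t0, List.orderedInsert (· ≤ ·) s rB = h0 :: t0 := by
      cases e : List.orderedInsert (· ≤ ·) s rB with
      | nil => exact absurd (e ▸ hperm').length_eq (by simp)
      | cons a b => exact ⟨a, b, rfl⟩
    have hmin : PySem.List.min? (rA ++ [s]) (fun y => y) = some h0 :=
      min?_eq_head _ h0 t0 (hins ▸ hperm').symm (hins ▸ hsortins)
    refine ⟨ans ++ [h0], rA ++ [s], h0 :: t0, ?_, ?_, hins ▸ hperm', hins ▸ hsortins, ?_⟩
    · simp [pvStepA, hlt, hmin]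
    · have hc : ¬ (k ≤ (t0.length : Int)) := by
        have hl := hperm'.length_eq
        rw [hins] at hl; simp at hl; omega
      simp [pvStepB, hins, hc, PySem.List.pyGet?, PySem.List.pyIdx?]
    · simp; omega
  · -- rank full: k ≤ len rA, rB nonempty
    obtain ⟨h0, t0, rfl⟩ : ∃ h0 t0, rB = h0 :: t0 := by
      cases rB with
      | nil => exfalso; simp at hlenBA; omega
      | cons a b => exact ⟨a, b, rfl⟩
    have hminA : PySem.List.min? rA (fun y => y) = some h0 :=
      min?_eq_head _ h0 t0 hperm.symm hsort
    have hmem : h0 ∈ rA := hperm.mem_iff.mp (by simp)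
    have hpop : (((List.orderedInsert (· ≤ ·) s (h0 :: t0)).length : Int) > k) := by
      rw [List.orderedInsert_length]; push_cast at hlenBA ⊢; omega
    by_cases hgt : s > h0
    · -- replace the minimum
      have hinsC : List.orderedInsert (· ≤ ·) s (h0 :: t0)
          = h0 :: List.orderedInsert (· ≤ ·) s t0 := by
        simp [List.orderedInsert, not_le.mpr hgt]
      have hrem : PySem.List.remove? rA h0 = some (rA.erase h0) :=
        PySem.List.remove?_eq_some_erase rA h0 hmem
      have hpermT : (List.orderedInsert (· ≤ ·) s t0).Perm (rA.erase h0 ++ [s]) := by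
        refine (List.perm_orderedInsert _ s t0).trans ?_
        refine ((?_ : t0.Perm (rA.erase h0)).cons s).trans (List.perm_append_singleton s _).symm
        have := (hperm.erase h0)
        rwa [List.erase_cons_head] at this
      have hsortT : (List.orderedInsert (· ≤ ·) s t0).Pairwise (· ≤ ·) :=
        List.Pairwise.orderedInsert s t0 hsort.tail
      obtain ⟨h1, t1, hins1⟩ : ∃ h1 t1, List.orderedInsert (· ≤ ·) s t0 = h1 :: t1 := by
        cases e : List.orderedInsert (· ≤ ·) s t0 with
        | nil => exact absurd (List.orderedInsert_length (· ≤ ·) t0 s) (by rw [e]; simp)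
        | cons a b => exact ⟨a, b, rfl⟩
      have hminA' : PySem.List.min? (rA.erase h0 ++ [s]) (fun y => y) = some h1 :=
        min?_eq_head _ h1 t1 (hins1 ▸ hpermT).symm (hins1 ▸ hsortT)
      refine ⟨ans ++ [h1], rA.erase h0 ++ [s], h1 :: t1, ?_, ?_,
        hins1 ▸ hpermT, hins1 ▸ hsortT, ?_⟩
      · simp [pvStepA, hlt, hminA, hgt, hrem, hminA']
      · have hl1 : t1.length = t0.length := by
          have := List.orderedInsert_length (· ≤ ·) t0 s; rw [hins1] at this; simpa using this
        have hc : k ≤ (t1.length : Int) + 1 := by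
          simp at hlenBA; rw [hl1]; omega
        simp [pvStepB, hinsC, hins1, hc, PySem.List.pyGet?, PySem.List.pyIdx?]
      · have : (rA.erase h0).length = rA.length - 1 := List.length_erase_of_mem hmem
        have hpos : 1 ≤ rA.length := by
          cases rA with | nil => simp at hmem | cons a b => simp
        simp [this]; omega
    · -- keep rank: s ≤ h0, B inserts at front and pops it again
      have hinsC : List.orderedInsert (· ≤ ·) s (h0 :: t0) = s :: h0 :: t0 := by
        simp [List.orderedInsert, not_lt.mp hgt]
      refine ⟨ans ++ [h0], rA, h0 :: t0, ?_, ?_, hperm, hsort, hlen⟩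
      · simp [pvStepA, hlt, hminA, hgt]
      · have hc : k ≤ (t0.length : Int) + 1 := by
          simp at hlenBA; omega
        simp [pvStepB, hinsC, hc, PySem.List.pyGet?, PySem.List.pyIdx?]

-- the two loops produce the same answers from related states
lemma fold_sim (k : Int) (hk : 1 ≤ k) :
    ∀ (score ans rA rB : List Int), rB.Perm rA → rB.Pairwise (· ≤ ·) →
      (rA.length : Int) ≤ k →
      (score.foldl (pvStepA k) (ans, rA)).1 = (score.foldl (pvStepB k) (ans, rB)).1 := by
  intro score
  induction score with
  | nil => intro ans rA rB _ _ _; rfl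
  | cons s rest ih =>
      intro ans rA rB hperm hsort hlen
      obtain ⟨ans', rA', rB', hA, hB, hperm', hsort', hlen'⟩ :=
        step_sim k hk ans rA rB s hperm hsort hlen
      simp only [List.foldl_cons, hA, hB]
      exact ih ans' rA' rB' hperm' hsort' hlen'

-- ===== VERDICT (by name: the statement is the Claim_ definition above) =====
theorem solution_spec : Claim_equal_solution := by
  intro k score _ hpre
  unfold Spec_solution solution solution_alt
  rcases hpre with hk | rfl
  · exact fold_sim k hk score [] [] [] (List.Perm.refl _) (List.Pairwise.nil) (by simp; omega)
  · rfl
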